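-- pv_equiv track=rewrite | github.com/owenguobadia24s-collab/ovc-infra | scripts/repo_cartographer/cartographer.py | build_untracked_visible_md
-- ===== SOURCE A (Python) =====
-- from typing import Any
--
-- def build_untracked_visible_md(records: list[dict[str, Any]]) -> str:
--     lines: list[str] = []
--     lines.append("# UNTRACKED_VISIBLE_REPORT v0.1\n")
--
--     untracked = [r for r in records if r["tracked_status"] == "untracked_visible"]
--     lines.append(f"**Total untracked-visible files:** {len(untracked)}\n")
--
--     unknown = sorted([r["path"] for r in untracked if r["module_id"] == "UNKNOWN"])
--     borderland = sorted([r["path"] for r in untracked if r["module_id"] == "BORDERLAND"])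
--     module_matched = sorted([r["path"] for r in untracked if r["module_id"] not in ("UNKNOWN", "BORDERLAND")])
--
--     lines.append("## UNKNOWN (unclassified)\n")
--     if unknown:
--         for p in unknown:
--             lines.append(f"- `{p}`")
--     else:
--         lines.append("(none)")
--     lines.append("")
--
--     lines.append("## Borderland-matched\n")
--     if borderland:
--         for p in borderland:
--             lines.append(f"- `{p}`")
--     else:
--         lines.append("(none)")
--     lines.append("")
--
--     lines.append("## Module-matched\n")
--     if module_matched:
--         for p in module_matched:
--             lines.append(f"- `{p}`")
--     else:
--         lines.append("(none)")
--     lines.append("")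
--
--     return "\n".join(lines) + "\n"
-- ===== SOURCE B (Python) =====
-- def build_untracked_visible_md(records):
--     # Single partition pass + table-driven section emission (alternative decomposition).
--     count = 0
--     unknown, borderland, other = [], [], []
--     for r in records:
--         if r["tracked_status"] != "untracked_visible":
--             continue
--         count += 1
--         mid = r["module_id"]
--         if mid == "UNKNOWN":
--             unknown.append(r["path"])
--         elif mid == "BORDERLAND":
--             borderland.append(r["path"])
--         else:
--             other.append(r["path"])
--     out = ["# UNTRACKED_VISIBLE_REPORT v0.1\n",
--            f"**Total untracked-visible files:** {count}\n"]
--     for header, bucket in (("## UNKNOWN (unclassified)\n", unknown),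
--                            ("## Borderland-matched\n", borderland),
--                            ("## Module-matched\n", other)):
--         out.append(header)
--         paths = sorted(bucket)
--         if paths:
--             out.extend(f"- `{p}`" for p in paths)
--         else:
--             out.append("(none)")
--         out.append("")
--     return "\n".join(out) + "\n"
-- ===== Notes on version B (the rewrite author's own statement) =====
-- stated objective: alternative
-- what changed: One pass over the records partitions paths into three buckets while counting, and a single table-driven loop over (header, bucket) pairs emits every section, replacing A's four separate filtering scans and three unrolled emission blocks.
import Mathlib
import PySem

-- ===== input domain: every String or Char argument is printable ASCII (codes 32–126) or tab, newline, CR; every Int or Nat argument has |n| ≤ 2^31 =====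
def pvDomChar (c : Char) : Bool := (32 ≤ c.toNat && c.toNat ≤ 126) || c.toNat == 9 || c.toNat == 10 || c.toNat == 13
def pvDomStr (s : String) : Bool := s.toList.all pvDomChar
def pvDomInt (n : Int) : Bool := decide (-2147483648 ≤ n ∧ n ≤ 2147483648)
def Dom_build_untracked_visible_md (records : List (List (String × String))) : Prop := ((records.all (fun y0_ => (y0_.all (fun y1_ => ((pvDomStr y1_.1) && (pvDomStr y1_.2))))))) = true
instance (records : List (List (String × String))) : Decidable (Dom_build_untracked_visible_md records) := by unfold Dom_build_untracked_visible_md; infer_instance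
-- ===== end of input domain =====

-- B replaces A's four filtering scans and three unrolled emission blocks with one partition
-- pass over the records plus one table-driven emission loop (objective: alternative).
-- Pre_ excludes records on which Python A raises KeyError (missing dict keys).

-- r[k] for a record dict; Pre_ guarantees the key is present, so the default is never used inside Pre_
def pvGetS (r : List (String × String)) (k : String) : String := ((PySem.Dict.mk r).get? k).getD ""

-- ===== PORT A =====
def build_untracked_visible_md (records : List (List (String × String))) : String :=
  let lines1 : List String := ["# UNTRACKED_VISIBLE_REPORT v0.1\n"]
  let untracked := records.filter (fun r => pvGetS r "tracked_status" == "untracked_visible")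
  let lines2 := lines1 ++ ["**Total untracked-visible files:** " ++ PySem.Int.toStr (untracked.length : Int) ++ "\n"]
  let unknown := PySem.List.sorted ((untracked.filter (fun r => pvGetS r "module_id" == "UNKNOWN")).map (fun r => pvGetS r "path")) (fun x => x) false
  let borderland := PySem.List.sorted ((untracked.filter (fun r => pvGetS r "module_id" == "BORDERLAND")).map (fun r => pvGetS r "path")) (fun x => x) false
  let module_matched := PySem.List.sorted ((untracked.filter (fun r => !(pvGetS r "module_id" == "UNKNOWN" || pvGetS r "module_id" == "BORDERLAND"))).map (fun r => pvGetS r "path")) (fun x => x) false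
  let lines3 := lines2 ++ ["## UNKNOWN (unclassified)\n"] ++
    (if unknown.isEmpty then ["(none)"] else unknown.map (fun p => "- `" ++ p ++ "`")) ++ [""]
  let lines4 := lines3 ++ ["## Borderland-matched\n"] ++
    (if borderland.isEmpty then ["(none)"] else borderland.map (fun p => "- `" ++ p ++ "`")) ++ [""]
  let lines5 := lines4 ++ ["## Module-matched\n"] ++
    (if module_matched.isEmpty then ["(none)"] else module_matched.map (fun p => "- `" ++ p ++ "`")) ++ [""]
  PySem.Str.join "\n" lines5 ++ "\n"

-- ===== PORT B =====
-- the loop body of B's single partition pass: (count, unknown, borderland, other)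
def pvStep (st : Int × List String × List String × List String)
    (r : List (String × String)) : Int × List String × List String × List String :=
  if pvGetS r "tracked_status" == "untracked_visible" then
    let mid := pvGetS r "module_id"
    let p := pvGetS r "path"
    if mid == "UNKNOWN" then (st.1 + 1, st.2.1 ++ [p], st.2.2.1, st.2.2.2)
    else if mid == "BORDERLAND" then (st.1 + 1, st.2.1, st.2.2.1 ++ [p], st.2.2.2)
    else (st.1 + 1, st.2.1, st.2.2.1, st.2.2.2 ++ [p])
  else st

def pvClassify (records : List (List (String × String))) :
    Int × List String × List String × List String :=
  records.foldl pvStep (0, [], [], [])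

-- one step of the table-driven emission loop
def pvEmitSection (out : List String) (hb : String × List String) : List String :=
  let paths := PySem.List.sorted hb.2 (fun x => x) false
  (out ++ [hb.1]) ++
    (if paths.isEmpty then ["(none)"] else paths.map (fun p => "- `" ++ p ++ "`")) ++ [""]

def build_untracked_visible_md_alt (records : List (List (String × String))) : String :=
  let st := pvClassify records
  let out : List String := ["# UNTRACKED_VISIBLE_REPORT v0.1\n",
    "**Total untracked-visible files:** " ++ PySem.Int.toStr st.1 ++ "\n"]
  let out := [("## UNKNOWN (unclassified)\n", st.2.1),
              ("## Borderland-matched\n", st.2.2.1),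
              ("## Module-matched\n", st.2.2.2)].foldl pvEmitSection out
  PySem.Str.join "\n" out ++ "\n"

-- ===== PRECONDITION & SPEC =====
-- Pre_ excludes exactly the inputs on which Python A raises KeyError: a record without
-- "tracked_status", or an untracked_visible record without "module_id" or "path".
def Pre_build_untracked_visible_md (records : List (List (String × String))) : Prop :=
  (records.all (fun r =>
    ((PySem.Dict.mk r).get? "tracked_status").isSome &&
    (if (PySem.Dict.mk r).get? "tracked_status" == some "untracked_visible" then
      ((PySem.Dict.mk r).get? "module_id").isSome && ((PySem.Dict.mk r).get? "path").isSome
    else true))) = true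
instance (records : List (List (String × String))) : Decidable (Pre_build_untracked_visible_md records) := by
  unfold Pre_build_untracked_visible_md; infer_instance

def pvWitness_build_untracked_visible_md : (List (List (String × String))) :=
  [[("tracked_status", "untracked_visible"), ("module_id", "UNKNOWN"), ("path", "a.txt")],
   [("tracked_status", "tracked")]]

def Spec_build_untracked_visible_md (records : List (List (String × String))) (out : String) : Prop := out = build_untracked_visible_md_alt records
instance (records : List (List (String × String))) (out : String) : Decidable (Spec_build_untracked_visible_md records out) := by unfold Spec_build_untracked_visible_md; infer_instance

-- ===== CLAIM (what is proved, stated in full; the proofs are below) =====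
def Claim_equal_build_untracked_visible_md : Prop := ∀ (records : List (List (String × String))), Dom_build_untracked_visible_md records → Pre_build_untracked_visible_md records → Spec_build_untracked_visible_md records (build_untracked_visible_md records)

-- ===== LEMMAS AND PROOFS =====

-- the partition fold, run from any accumulator, appends exactly A's filtered projections
theorem pvClassify_spec (records : List (List (String × String)))
    (c : Int) (u b o : List String) :
    records.foldl pvStep (c, u, b, o) =
    (let untracked := records.filter (fun r => pvGetS r "tracked_status" == "untracked_visible")
     (c + untracked.length,
      u ++ (untracked.filter (fun r => pvGetS r "module_id" == "UNKNOWN")).map (fun r => pvGetS r "path"),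
      b ++ (untracked.filter (fun r => pvGetS r "module_id" == "BORDERLAND")).map (fun r => pvGetS r "path"),
      o ++ (untracked.filter (fun r => !(pvGetS r "module_id" == "UNKNOWN" || pvGetS r "module_id" == "BORDERLAND"))).map (fun r => pvGetS r "path"))) := by
  induction records generalizing c u b o with
  | nil => simp
  | cons r rs ih =>
    simp only [List.foldl_cons]
    by_cases hs : pvGetS r "tracked_status" == "untracked_visible"
    · have hs' : pvGetS r "tracked_status" = "untracked_visible" := by simpa using hs
      by_cases hu : pvGetS r "module_id" == "UNKNOWN"
      · have hu' : pvGetS r "module_id" = "UNKNOWN" := by simpa using hu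
        rw [show pvStep (c, u, b, o) r = (c + 1, u ++ [pvGetS r "path"], b, o) from by
          simp [pvStep, hs, hu], ih]
        simp [hs', hu', List.append_assoc]
        omega
      · by_cases hb : pvGetS r "module_id" == "BORDERLAND"
        · have hb' : pvGetS r "module_id" = "BORDERLAND" := by simpa using hb
          rw [show pvStep (c, u, b, o) r = (c + 1, u, b ++ [pvGetS r "path"], o) from by
            simp [pvStep, hs, hu, hb], ih]
          simp [hs', hb', List.append_assoc]
          omega
        · rw [show pvStep (c, u, b, o) r = (c + 1, u, b, o ++ [pvGetS r "path"]) from by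
            simp [pvStep, hs, hu, hb], ih]
          simp [hs', hu, hb, List.append_assoc]
          omega
    · rw [show pvStep (c, u, b, o) r = (c, u, b, o) from by simp [pvStep, hs], ih]
      simp [hs]

-- ===== VERDICT (by name: the statement is the Claim_ definition above) =====
theorem build_untracked_visible_md_spec : Claim_equal_build_untracked_visible_md := by
  intro records _ _
  show build_untracked_visible_md records = build_untracked_visible_md_alt records
  unfold build_untracked_visible_md build_untracked_visible_md_alt pvClassify
  rw [pvClassify_spec]
  simp [pvEmitSection, List.append_assoc]
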